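-- pv_equiv track=rewrite | github.com/vdesmond/cdma-simulation | utils.py | walsh_code_generator
-- ===== SOURCE A (Python) =====
-- def walsh_code_generator(ini_mat, mat_size):
--     """
--     This function generates Walsh code using Hadamard matrices for chip sequences in CDMA
--
--     Args:
--             ini_mat (list): Initial Hadamard matrix
--             mat_size (int): Walsh code of size N (nearest power of 2 greater than mat_size)
--     """
--     templist = ini_mat.copy()
--
--     if len(ini_mat) >= mat_size:
--         return ini_mat
--
--     aclimit = len(ini_mat) - 1
--     limit = len(ini_mat) * 2
--
--     recurs_mat = [[0 for j in range(limit)] for i in range(limit)]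
--     outer, inner, cnt = 0, 0, 0
--     cnt = 0
--     for i in range(limit):
--         for j in range(limit):
--
--             # ? If bottom right matrix, multiply by -1
--             if i >= limit / 2 and j >= limit / 2:
--                 recurs_mat[i][j] = templist[outer][inner] * -1
--
--                 # ? Else copy the matrix as it is
--             else:
--                 recurs_mat[i][j] = templist[outer][inner]
--             inner += 1
--             if inner > aclimit:
--                 inner = 0
--
--         outer += 1
--         if outer > aclimit:
--             outer, inner = 0, 0
--         cnt += 1
--
--     return walsh_code_generator(recurs_mat, mat_size)
-- ===== SOURCE B (Python) =====
-- def walsh_code_generator(ini_mat, mat_size):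
--     """Closed-form rewrite: fill the final N x N matrix in one pass instead of
--     recursive doubling (entry = ini_mat[i % n0][j % n0] times the Hadamard sign
--     given by the common set bits of i//n0 and j//n0)."""
--     n0 = len(ini_mat)
--     if n0 >= mat_size:
--         return ini_mat
--     N = n0
--     while N < mat_size:
--         N *= 2
--     return [[ini_mat[i % n0][j % n0] * _sign(i // n0, j // n0)
--              for j in range(N)] for i in range(N)]
--
--
-- def _sign(a, b):
--     s = 1
--     while a:
--         if a & 1 and b & 1:
--             s = -s
--         a >>= 1
--         b >>= 1
--     return s
-- ===== Notes on version B (the rewrite author's own statement) =====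
-- stated objective: simpler
-- what changed: Replaces A's recursive doubling (building each intermediate 2n x 2n matrix with mutable outer/inner cursor state) by a single closed-form fill of the final N x N matrix: entry (i,j) = ini_mat[i % n0][j % n0] times the Hadamard sign given by the parity of the common set bits of i//n0 and j//n0.
import Mathlib
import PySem

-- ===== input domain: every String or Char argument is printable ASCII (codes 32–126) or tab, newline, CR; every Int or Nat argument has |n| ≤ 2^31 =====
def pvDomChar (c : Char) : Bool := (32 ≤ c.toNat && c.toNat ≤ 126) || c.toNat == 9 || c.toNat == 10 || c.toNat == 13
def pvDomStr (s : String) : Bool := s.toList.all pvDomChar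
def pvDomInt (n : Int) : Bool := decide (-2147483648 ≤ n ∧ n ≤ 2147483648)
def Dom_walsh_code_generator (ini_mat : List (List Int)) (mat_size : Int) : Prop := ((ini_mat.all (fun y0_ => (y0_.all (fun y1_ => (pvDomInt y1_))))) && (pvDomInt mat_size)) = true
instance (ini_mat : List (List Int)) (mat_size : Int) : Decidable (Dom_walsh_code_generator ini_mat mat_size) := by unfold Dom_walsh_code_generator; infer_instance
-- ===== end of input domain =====

-- B fills the final matrix in one closed-form pass instead of A's recursive doubling (objective: simpler).

-- ===== PORT A =====
-- inner `for j in range(limit)` loop body; state = (recurs_mat, inner).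
-- templist[outer][inner] is ported with getD: indices are nonnegative and in range under Pre_
-- (outside Pre_ Python raises IndexError / RecursionError, which Pre_ excludes).
def innerF (templist : List (List Int)) (n o i : Nat) (st2 : List (List Int) × Nat) (j : Nat) :
    List (List Int) × Nat :=
  let x := (templist.getD o []).getD st2.2 0
  -- `i >= limit / 2 and j >= limit / 2` : limit / 2 is exactly n
  let v := if i ≥ n ∧ j ≥ n then x * (-1) else x
  -- recurs_mat[i][j] = v
  let mat := st2.1.set i ((st2.1.getD i []).set j v)
  let inner' := st2.2 + 1
  -- `if inner > aclimit: inner = 0` with aclimit = n - 1 (loops are empty when n = 0)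
  (mat, if inner' > n - 1 then 0 else inner')

-- outer `for i in range(limit)` loop body; state = (recurs_mat, outer, inner). (cnt is write-only and omitted.)
def outerF (templist : List (List Int)) (n limit : Nat) (st : List (List Int) × Nat × Nat) (i : Nat) :
    List (List Int) × Nat × Nat :=
  let outer := st.2.1
  let is := (List.range limit).foldl (innerF templist n outer i) (st.1, st.2.2)
  let outer' := outer + 1
  if outer' > n - 1 then (is.1, 0, 0) else (is.1, outer', is.2)

-- one doubling step: the body of A between the early return and the recursive call
def aStep (ini_mat : List (List Int)) : List (List Int) :=
  let n := ini_mat.length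
  let limit := n * 2
  let recurs0 : List (List Int) :=
    (List.range limit).map (fun _ => (List.range limit).map (fun _ => (0 : Int)))
  ((List.range limit).foldl (outerF ini_mat n limit) (recurs0, 0, 0)).1

-- A's recursion, made total with fuel; mat_size.toNat + 1 doublings always suffice under Pre_
def walshFuel : Nat → List (List Int) → Int → List (List Int)
  | 0, ini_mat, _ => ini_mat          -- fuel exhausted: unreachable under Pre_
  | f + 1, ini_mat, mat_size =>
      if (ini_mat.length : Int) ≥ mat_size then ini_mat
      else walshFuel f (aStep ini_mat) mat_size

def walsh_code_generator (ini_mat : List (List Int)) (mat_size : Int) : List (List Int) :=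
  walshFuel (mat_size.toNat + 1) ini_mat mat_size

-- ===== PORT B =====
-- _sign(a, b): parity of the common set bits of a and b, as the bit-loop in Source B
def signAux (a b : Nat) : Int :=
  if a = 0 then 1
  else (if a % 2 = 1 ∧ b % 2 = 1 then (-1 : Int) else 1) * signAux (a / 2) (b / 2)
termination_by a
decreasing_by simp_wf; omega

-- the `while N < mat_size: N *= 2` loop, made total with fuel
def growFuel : Nat → Nat → Int → Nat
  | 0, N, _ => N
  | f + 1, N, mat_size => if (N : Int) < mat_size then growFuel f (N * 2) mat_size else N

-- the closed-form N×N table comprehension of Source B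
def mkTable (ini_mat : List (List Int)) (n0 N : Nat) : List (List Int) :=
  (List.range N).map (fun i => (List.range N).map (fun j =>
    ((ini_mat.getD (i % n0) []).getD (j % n0) 0) * signAux (i / n0) (j / n0)))

def walsh_code_generator_alt (ini_mat : List (List Int)) (mat_size : Int) : List (List Int) :=
  let n0 := ini_mat.length
  if (n0 : Int) ≥ mat_size then ini_mat
  else mkTable ini_mat n0 (growFuel (mat_size.toNat + 1) n0 mat_size)

-- ===== PRECONDITION & SPEC =====
-- Pre_ excludes exactly the inputs where Python A raises: an empty matrix that still needs doubling
-- (infinite recursion → RecursionError) and a matrix with a row shorter than its number of rows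
-- when doubling is needed (IndexError).
def Pre_walsh_code_generator (ini_mat : List (List Int)) (mat_size : Int) : Prop :=
  (ini_mat.length : Int) ≥ mat_size ∨
    (ini_mat ≠ [] ∧ ∀ r ∈ ini_mat, ini_mat.length ≤ r.length)
instance (ini_mat : List (List Int)) (mat_size : Int) : Decidable (Pre_walsh_code_generator ini_mat mat_size) := by
  unfold Pre_walsh_code_generator; infer_instance

def pvWitness_walsh_code_generator : List (List Int) × Int := ([[1]], 2)

def Spec_walsh_code_generator (ini_mat : List (List Int)) (mat_size : Int) (out : List (List Int)) : Prop := out = walsh_code_generator_alt ini_mat mat_size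
instance (ini_mat : List (List Int)) (mat_size : Int) (out : List (List Int)) : Decidable (Spec_walsh_code_generator ini_mat mat_size out) := by unfold Spec_walsh_code_generator; infer_instance

-- ===== CLAIM (what is proved, stated in full; the proofs are below) =====
def Claim_equal_walsh_code_generator : Prop := ∀ (ini_mat : List (List Int)) (mat_size : Int), Dom_walsh_code_generator ini_mat mat_size → Pre_walsh_code_generator ini_mat mat_size → Spec_walsh_code_generator ini_mat mat_size (walsh_code_generator ini_mat mat_size)

-- ===== LEMMAS AND PROOFS =====

-- the value A writes at position (i, j) of the doubled matrix, with o = i % n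
def gEnt (templist : List (List Int)) (n o i j : Nat) : Int :=
  let x := (templist.getD o []).getD (j % n) 0
  if i ≥ n ∧ j ≥ n then x * (-1) else x

theorem set_append_len {α : Type} (A : List α) (b v : α) (l : List α) :
    (A ++ b :: l).set A.length v = A ++ v :: l := by
  induction A with
  | nil => rfl
  | cons a A ih => simpa using ih

theorem set_append_len' {α : Type} (A : List α) (b v : α) (l : List α) (k : Nat)
    (hA : A.length = k) : (A ++ b :: l).set k v = A ++ v :: l := by
  subst hA; exact set_append_len A b v l

theorem getD_append_len {α : Type} (A : List α) (b : α) (l : List α) (d : α) :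
    (A ++ b :: l).getD A.length d = b := by
  induction A with
  | nil => rfl
  | cons a A ih => simpa using ih

theorem getD_append_len' {α : Type} (A : List α) (b : α) (l : List α) (d : α) (k : Nat)
    (hA : A.length = k) : (A ++ b :: l).getD k d = b := by
  subst hA; exact getD_append_len A b l d

theorem getD_set_self {α : Type} (l : List α) (i : Nat) (v d : α) (h : i < l.length) :
    (l.set i v).getD i d = v := by
  rw [List.getD_eq_getElem?_getD, List.getElem?_set_self' ]
  simp [List.getElem?_eq_getElem, h]

theorem set_getD_self {α : Type} (l : List α) (i : Nat) (d : α) (h : i < l.length) :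
    l.set i (l.getD i d) = l := by
  rw [List.getD_eq_getElem?_getD, List.getElem?_eq_getElem h]
  simp

theorem getD_map_range {α : Type} (f : Nat → α) (L a : Nat) (d : α) (h : a < L) :
    ((List.range L).map f).getD a d = f a := by
  rw [List.getD_eq_getElem?_getD]
  simp [List.getElem?_map, List.getElem?_range, h]

theorem counter_step (n k : Nat) (hn : 1 ≤ n) :
    (if k % n + 1 > n - 1 then 0 else k % n + 1) = (k + 1) % n := by
  have hk : k % n < n := Nat.mod_lt _ hn
  have h1 : (k + 1) % n = (k % n + 1) % n := (Nat.mod_add_mod k n 1).symm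
  by_cases h : k % n + 1 = n
  · have h2 : (k + 1) % n = 0 := by rw [h1, h, Nat.mod_self]
    rw [h2, if_pos (by omega)]
  · have h2 : (k + 1) % n = k % n + 1 := by rw [h1, Nat.mod_eq_of_lt (by omega)]
    rw [h2, if_neg (by omega)]

theorem signAux_unfold (a b : Nat) : signAux a b =
    if a = 0 then 1 else (if a % 2 = 1 ∧ b % 2 = 1 then (-1 : Int) else 1) * signAux (a / 2) (b / 2) := by
  rw [signAux]

theorem signAux_zero (b : Nat) : signAux 0 b = 1 := by rw [signAux_unfold]; simp

theorem signAux_one (b : Nat) : signAux 1 b = if b % 2 = 1 then (-1 : Int) else 1 := by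
  rw [signAux_unfold]
  simp [signAux_zero]

theorem sign_split (a b : Nat) :
    signAux a b = signAux (a % 2) (b % 2) * signAux (a / 2) (b / 2) := by
  by_cases h : a = 0
  · simp [h, signAux_zero]
  · rw [signAux_unfold a b, if_neg h]
    rcases Nat.mod_two_eq_zero_or_one a with h2 | h2
    · rw [h2, signAux_zero]
      simp [h2]
    · rw [h2, signAux_one]
      have hb : b % 2 % 2 = b % 2 := by omega
      rcases Nat.mod_two_eq_zero_or_one b with h3 | h3 <;> simp [h2, h3]

theorem inner_fold (templist : List (List Int)) (n o i : Nat) (hn : 1 ≤ n)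
    (mat : List (List Int)) (hi : i < mat.length)
    (hlen : (mat.getD i []).length = n * 2) :
    ∀ k, k ≤ n * 2 →
    (List.range k).foldl (innerF templist n o i) (mat, 0) =
      (mat.set i (((List.range k).map (gEnt templist n o i)) ++ (mat.getD i []).drop k), k % n) := by
  intro k
  induction k with
  | zero =>
      intro _
      simp only [List.range_zero, List.map_nil, List.nil_append, List.drop_zero,
        List.foldl_nil, Nat.zero_mod]
      rw [set_getD_self mat i [] hi]
  | succ k ih =>
      intro hk1
      rw [List.range_succ, List.foldl_append, ih (by omega)]
      have hklen : k < (mat.getD i []).length := by omega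
      obtain ⟨c, hc⟩ : ∃ c, (mat.getD i []).drop k = c :: (mat.getD i []).drop (k + 1) :=
        ⟨(mat.getD i [])[k], List.drop_eq_getElem_cons hklen⟩
      rw [hc]
      simp only [List.foldl_cons, List.foldl_nil, innerF]
      rw [getD_set_self _ _ _ _ hi, List.set_set]
      rw [set_append_len' _ _ _ _ _ (by simp)]
      rw [counter_step n k hn]
      simp only [List.map_append, List.map_cons, List.map_nil, List.append_assoc,
        List.singleton_append]
      rfl

theorem outer_fold (templist : List (List Int)) (n : Nat) (hn : 1 ≤ n) :
    ∀ k, k ≤ n * 2 →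
    (List.range k).foldl (outerF templist n (n * 2))
        ((List.range (n * 2)).map (fun _ => (List.range (n * 2)).map (fun _ => (0 : Int))), 0, 0) =
      ((List.range k).map (fun i => (List.range (n * 2)).map (gEnt templist n (i % n) i)) ++
        ((List.range (n * 2)).map (fun _ => (List.range (n * 2)).map (fun _ => (0 : Int)))).drop k,
       k % n, 0) := by
  intro k
  induction k with
  | zero => intro _; simp
  | succ k ih =>
      intro hk1
      rw [List.range_succ, List.foldl_append, ih (by omega)]
      simp only [List.foldl_cons, List.foldl_nil, outerF]
      have hi : k < ((List.range k).map (fun i => (List.range (n * 2)).map (gEnt templist n (i % n) i)) ++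
          ((List.range (n * 2)).map (fun _ => (List.range (n * 2)).map (fun _ => (0 : Int)))).drop k).length := by
        simp; omega
      have hzk : ((List.range (n * 2)).map (fun _ => (List.range (n * 2)).map (fun _ => (0 : Int)))).drop k =
          ((List.range (n * 2)).map (fun _ => (0 : Int))) ::
          ((List.range (n * 2)).map (fun _ => (List.range (n * 2)).map (fun _ => (0 : Int)))).drop (k + 1) := by
        rw [List.drop_eq_getElem_cons (by simp; omega)]
        congr 1
        simp
      have hgetD : ((List.range k).map (fun i => (List.range (n * 2)).map (gEnt templist n (i % n) i)) ++
          ((List.range (n * 2)).map (fun _ => (List.range (n * 2)).map (fun _ => (0 : Int)))).drop k).getD k [] =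
          (List.range (n * 2)).map (fun _ => (0 : Int)) := by
        rw [hzk]
        exact getD_append_len' _ _ _ _ _ (by simp)
      have hfold := inner_fold templist n (k % n) k hn _ hi (by rw [hgetD]; simp) (n * 2) (le_refl _)
      rw [hgetD] at hfold
      have hdrop : List.drop (n * 2) ((List.range (n * 2)).map (fun _ => (0 : Int))) = [] := by simp
      rw [hdrop, List.append_nil, Nat.mul_mod_right] at hfold
      rw [hfold]
      have hset : (((List.range k).map (fun i => (List.range (n * 2)).map (gEnt templist n (i % n) i)) ++
          ((List.range (n * 2)).map (fun _ => (List.range (n * 2)).map (fun _ => (0 : Int)))).drop k).set k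
            ((List.range (n * 2)).map (gEnt templist n (k % n) k))) =
          ((List.range k).map (fun i => (List.range (n * 2)).map (gEnt templist n (i % n) i)) ++
            ((List.range (n * 2)).map (gEnt templist n (k % n) k)) ::
            ((List.range (n * 2)).map (fun _ => (List.range (n * 2)).map (fun _ => (0 : Int)))).drop (k + 1)) := by
        rw [hzk]
        exact set_append_len' _ _ _ _ _ (by simp)
      rw [hset]
      simp only [List.map_append, List.map_cons, List.map_nil, List.append_assoc,
        List.singleton_append]
      rw [← counter_step n k hn]
      split_ifs <;> rfl

theorem signAux_small (n i j : Nat) (hn : 1 ≤ n) (hi : i < n * 2) (hj : j < n * 2) :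
    signAux (i / n) (j / n) = if i ≥ n ∧ j ≥ n then (-1 : Int) else 1 := by
  by_cases h1 : n ≤ i
  · have hdi : i / n = 1 := Nat.div_eq_of_lt_le (by omega) (by omega)
    by_cases h2 : n ≤ j
    · have hdj : j / n = 1 := Nat.div_eq_of_lt_le (by omega) (by omega)
      rw [hdi, hdj, signAux_one]
      simp [h1, h2]
    · have hdj : j / n = 0 := Nat.div_eq_of_lt (by omega)
      rw [hdi, hdj, signAux_one]
      simp [h2]
  · have hdi : i / n = 0 := Nat.div_eq_of_lt (by omega)
    rw [hdi, signAux_zero]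
    simp [h1]

theorem aStep_eq_mkTable (ini_mat : List (List Int)) (hn : 1 ≤ ini_mat.length) :
    aStep ini_mat = mkTable ini_mat ini_mat.length (ini_mat.length * 2) := by
  show ((List.range (ini_mat.length * 2)).foldl (outerF ini_mat ini_mat.length (ini_mat.length * 2))
      ((List.range (ini_mat.length * 2)).map (fun _ => (List.range (ini_mat.length * 2)).map (fun _ => (0 : Int))),
        0, 0)).1 = _
  rw [outer_fold ini_mat ini_mat.length hn (ini_mat.length * 2) (le_refl _)]
  rw [List.drop_eq_nil_of_le (by simp), List.append_nil]
  unfold mkTable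
  apply List.map_congr_left
  intro i hi
  apply List.map_congr_left
  intro j hj
  rw [List.mem_range] at hi hj
  simp only [gEnt]
  rw [signAux_small ini_mat.length i j hn hi hj]
  split_ifs with h
  · rfl
  · exact (mul_one _).symm

theorem mkTable_compose (ini_mat : List (List Int)) (n N : Nat) (hn : 1 ≤ n) :
    mkTable (mkTable ini_mat n (n * 2)) (n * 2) N = mkTable ini_mat n N := by
  unfold mkTable
  apply List.map_congr_left
  intro i _
  apply List.map_congr_left
  intro j _
  rw [getD_map_range _ _ _ _ (Nat.mod_lt _ (by omega)),
    getD_map_range _ _ _ _ (Nat.mod_lt _ (by omega))]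
  rw [Nat.mod_mod_of_dvd i ⟨2, rfl⟩, Nat.mod_mod_of_dvd j ⟨2, rfl⟩]
  rw [Nat.mod_mul_right_div_self, Nat.mod_mul_right_div_self]
  rw [← Nat.div_div_eq_div_mul i n 2, ← Nat.div_div_eq_div_mul j n 2]
  rw [sign_split (i / n) (j / n)]
  ring

theorem grow_stop (f N : Nat) (m : Int) (h : ¬ ((N : Int) < m)) : growFuel f N m = N := by
  cases f <;> simp [growFuel, h]

theorem grow_ext (m : Int) : ∀ (f g N : Nat), 1 ≤ N → m ≤ (N : Int) * 2 ^ f → f ≤ g →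
    growFuel f N m = growFuel g N m := by
  intro f
  induction f with
  | zero =>
      intro g N h1 h2 _
      simp only [pow_zero, mul_one] at h2
      rw [grow_stop 0 N m (by omega), grow_stop g N m (by omega)]
  | succ f ih =>
      intro g N h1 h2 hle
      by_cases hN : (N : Int) < m
      · cases g with
        | zero => omega
        | succ g =>
            simp only [growFuel, if_pos hN]
            refine ih g (N * 2) (by omega) ?_ (by omega)
            have he : ((N * 2 : Nat) : Int) * 2 ^ f = (N : Int) * 2 ^ (f + 1) := by
              push_cast; ring
            rw [he]; exact h2
      · rw [grow_stop _ _ _ hN, grow_stop _ _ _ hN]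

theorem two_pow_toNat_ge (m : Int) (h : 1 ≤ m) : m ≤ 2 ^ m.toNat := by
  have h1 : (m.toNat : Int) = m := Int.toNat_of_nonneg (by omega)
  have h2 : m.toNat < 2 ^ m.toNat := Nat.lt_two_pow_self
  calc m = (m.toNat : Int) := h1.symm
    _ ≤ ((2 ^ m.toNat : Nat) : Int) := by exact_mod_cast h2.le
    _ = 2 ^ m.toNat := by push_cast; rfl

theorem walshFuel_eq : ∀ (f : Nat) (ini_mat : List (List Int)) (m : Int),
    1 ≤ ini_mat.length → m ≤ (ini_mat.length : Int) * 2 ^ f →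
    walshFuel (f + 1) ini_mat m = walsh_code_generator_alt ini_mat m := by
  intro f
  induction f with
  | zero =>
      intro ini m hn h2
      simp only [pow_zero, mul_one] at h2
      simp [walshFuel, walsh_code_generator_alt, h2]
  | succ f ih =>
      intro ini m hn h2
      by_cases hge : (ini.length : Int) ≥ m
      · simp [walshFuel, walsh_code_generator_alt, hge]
      · have hstep : aStep ini = mkTable ini ini.length (ini.length * 2) :=
          aStep_eq_mkTable ini hn
        have hlen2 : (aStep ini).length = ini.length * 2 := by rw [hstep]; simp [mkTable]
        have h0 : walshFuel (f + 1 + 1) ini m = walshFuel (f + 1) (aStep ini) m := by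
          simp [walshFuel, hge]
        have hsuf : m ≤ ((aStep ini).length : Int) * 2 ^ f := by
          rw [hlen2]
          have he : ((ini.length * 2 : Nat) : Int) * 2 ^ f = (ini.length : Int) * 2 ^ (f + 1) := by
            push_cast; ring
          rw [he]; exact h2
        rw [h0, ih (aStep ini) m (by omega) hsuf, hstep]
        have hlenT : (mkTable ini ini.length (ini.length * 2)).length = ini.length * 2 := by
          simp [mkTable]
        have hlt : (ini.length : Int) < m := by omega
        have hm1 : 1 ≤ m := by omega
        simp only [walsh_code_generator_alt, hlenT]
        by_cases h2n : ((ini.length * 2 : Nat) : Int) ≥ m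
        · rw [if_pos h2n, if_neg (by omega)]
          obtain ⟨k, hk⟩ : ∃ k, m.toNat = k + 2 := ⟨m.toNat - 2, by omega⟩
          rw [hk]
          show mkTable ini ini.length (ini.length * 2) =
            mkTable ini ini.length (growFuel (k + 2 + 1) ini.length m)
          rw [show growFuel (k + 2 + 1) ini.length m = growFuel (k + 2) (ini.length * 2) m by
            simp [growFuel, hlt]]
          rw [grow_stop _ _ _ (by push_cast at h2n ⊢; omega)]
        · rw [if_neg h2n, if_neg (by omega)]
          rw [mkTable_compose ini ini.length (growFuel (m.toNat + 1) (ini.length * 2) m) hn]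
          congr 1
          have hsuf2 : m ≤ ((ini.length * 2 : Nat) : Int) * 2 ^ m.toNat := by
            have ha : m ≤ 2 ^ m.toNat := two_pow_toNat_ge m hm1
            have hb : (1 : Int) ≤ ((ini.length * 2 : Nat) : Int) := by push_cast; omega
            nlinarith [pow_pos (by norm_num : (0:Int) < 2) m.toNat]
          rw [← grow_ext m m.toNat (m.toNat + 1) (ini.length * 2) (by omega) hsuf2 (by omega)]
          rw [show growFuel (m.toNat + 1) ini.length m = growFuel m.toNat (ini.length * 2) m by
            cases h : m.toNat with
            | zero => omega
            | succ t => simp [growFuel, hlt]]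

-- ===== VERDICT (by name: the statement is the Claim_ definition above) =====
theorem walsh_code_generator_spec : Claim_equal_walsh_code_generator := by
  intro ini_mat mat_size _ hpre
  unfold Spec_walsh_code_generator walsh_code_generator
  rcases hpre with hge | ⟨hne, _⟩
  · simp [walshFuel, walsh_code_generator_alt, hge]
  · have hn : 1 ≤ ini_mat.length := List.length_pos_iff.mpr hne
    apply walshFuel_eq
    · exact hn
    · by_cases hm : mat_size ≤ 0
      · have : (0 : Int) ≤ (ini_mat.length : Int) * 2 ^ mat_size.toNat := by positivity
        omega
      · calc mat_size ≤ 2 ^ mat_size.toNat := two_pow_toNat_ge _ (by omega)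
          _ ≤ (ini_mat.length : Int) * 2 ^ mat_size.toNat := by
              have : (1 : Int) ≤ (ini_mat.length : Int) := by exact_mod_cast hn
              nlinarith [pow_pos (by norm_num : (0:Int) < 2) mat_size.toNat]
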